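-- pv_equiv track=rewrite | github.com/bigpick/code-practice | leetcode/2027_min_moves_to_convert_string/solution.py | minimumMoves
-- ===== SOURCE A (Python) =====
-- def minimumMoves(s: str) -> int:
--     moves = idx = 0
--     while idx < len(s):
--         if s[idx] == "O":
--             idx += 1
--             continue
--         # now we know we've hit an X, we have to go up two more places,
--         # assume all will be flipped to X (so increment the 'moves'
--         # counter), and then proceed
--         idx += 3
--         moves += 1
--
--     return moves
-- ===== SOURCE B (Python) =====
-- def minimumMoves(s: str) -> int:
--     n = len(s)
--     dp = [0] * (n + 3)
--     for i in range(n - 1, -1, -1):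
--         dp[i] = dp[i + 1] if s[i] == 'O' else 1 + dp[i + 3]
--     return dp[0]
-- ===== Notes on version B (the rewrite author's own statement) =====
-- stated objective: alternative
-- what changed: Replaced A's left-to-right greedy jump-scan (idx += 3 on each X) by a dynamic-programming table filled right-to-left: dp[i] = moves needed for the suffix s[i:], computed for every index, answer dp[0].
import Mathlib
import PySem

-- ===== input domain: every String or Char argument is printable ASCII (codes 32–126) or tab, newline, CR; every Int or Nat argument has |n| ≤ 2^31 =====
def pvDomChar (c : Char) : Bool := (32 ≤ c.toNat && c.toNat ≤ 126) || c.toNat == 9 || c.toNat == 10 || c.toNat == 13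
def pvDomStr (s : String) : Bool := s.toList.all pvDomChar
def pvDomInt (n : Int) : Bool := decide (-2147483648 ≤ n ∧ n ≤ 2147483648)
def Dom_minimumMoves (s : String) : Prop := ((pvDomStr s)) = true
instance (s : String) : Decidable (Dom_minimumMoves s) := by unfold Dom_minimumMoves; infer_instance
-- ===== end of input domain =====

-- B replaces A's left-to-right greedy jump-scan by a right-to-left dynamic-programming table
-- dp[i] = answer for the suffix s[i:]; alternative decomposition, same asymptotic cost.

-- ===== PORT A =====
-- A's while loop: idx walks the string; non-'O' increments moves and jumps by 3.
def minimumMovesLoop (cs : List Char) (idx : Nat) (moves : Int) : Int :=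
  if h : idx < cs.length then
    if cs[idx] = 'O' then minimumMovesLoop cs (idx + 1) moves
    else minimumMovesLoop cs (idx + 3) (moves + 1)
  else moves
termination_by cs.length - idx

def minimumMoves (s : String) : Int := minimumMovesLoop s.toList 0 0

-- ===== PORT B =====
-- B's for-loop body: dp[i] = dp[i+1] if s[i] == 'O' else 1 + dp[i+3]
def minimumMovesStep (cs : List Char) (dp : List Int) (i : Int) : List Int :=
  dp.set i.toNat (if cs[i.toNat]! = 'O' then dp[i.toNat + 1]! else 1 + dp[i.toNat + 3]!)

-- B: dp = [0]*(n+3); for i in range(n-1, -1, -1): dp[i] = …; return dp[0]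
def minimumMoves_alt (s : String) : Int :=
  let cs := s.toList
  let n := cs.length
  let dp : List Int := List.replicate (n + 3) 0
  let dp := (PySem.List.pyRange ((n : Int) - 1) (-1) (-1)).foldl (minimumMovesStep cs) dp
  dp[0]!

-- ===== PRECONDITION & SPEC =====
def Spec_minimumMoves (s : String) (out : Int) : Prop := out = minimumMoves_alt s
instance (s : String) (out : Int) : Decidable (Spec_minimumMoves s out) := by unfold Spec_minimumMoves; infer_instance

-- ===== CLAIM (what is proved, stated in full; the proofs are below) =====
def Claim_equal_minimumMoves : Prop := ∀ (s : String), Dom_minimumMoves s → Spec_minimumMoves s (minimumMoves s)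

-- ===== LEMMAS AND PROOFS =====

-- canonical recursive characterisation: both ports reduce to this
def pvGreedy : List Char → Int
  | [] => 0
  | c :: rest => if c = 'O' then pvGreedy rest else 1 + pvGreedy (rest.drop 2)
termination_by l => l.length
decreasing_by all_goals simp

theorem pvA_eq_greedy (cs : List Char) (idx : Nat) (moves : Int) :
    minimumMovesLoop cs idx moves = moves + pvGreedy (cs.drop idx) := by
  fun_induction minimumMovesLoop cs idx moves with
  | case1 idx moves h hO ih =>
    rw [ih]
    have hd : cs.drop idx = cs[idx] :: cs.drop (idx + 1) := (List.getElem_cons_drop h).symm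
    rw [hd, pvGreedy, if_pos hO]
  | case2 idx moves h hO ih =>
    rw [ih]
    have hd : cs.drop idx = cs[idx] :: cs.drop (idx + 1) := (List.getElem_cons_drop h).symm
    rw [hd, pvGreedy, if_neg hO, List.drop_drop]
    ring_nf
  | case3 idx moves h =>
    rw [List.drop_eq_nil_of_le (by omega), pvGreedy]; ring

theorem pvGetBang_eq_getD (l : List Int) (i : Nat) : l[i]! = l.getD i 0 := by
  rcases Nat.lt_or_ge i l.length with h | h
  · rw [getElem!_pos l i h, List.getD_eq_getElem l 0 h]
  · rw [getElem!_neg l i (by omega), List.getD_eq_default _ _ h]; rfl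

-- the countdown range peels off its (largest) head element
theorem pvRange_down_cons (k : Nat) :
    PySem.List.pyRange (k : Int) (-1) (-1) = (k : Int) :: PySem.List.pyRange ((k : Int) - 1) (-1) (-1) := by
  simp only [PySem.List.pyRange]
  norm_num
  rw [if_pos (show (-1 : Int) < (k : Int) by omega)]
  rcases Nat.eq_zero_or_pos k with hk | hk
  · subst hk; decide
  · rw [if_pos hk, List.range_succ_eq_map, List.map_cons, List.map_map]
    congr 1
    simp
    intro a _
    ring

-- fold invariant: after the loop has processed indices ≥ k, every dp slot j holds pvGreedy (cs.drop j)
theorem pvB_fold_inv (cs : List Char) (k : Nat) (hk : k ≤ cs.length) (dp : List Int)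
    (hlen : dp.length = cs.length + 3)
    (hinv : ∀ j, k ≤ j → dp.getD j 0 = pvGreedy (cs.drop j)) :
    ∀ j, ((PySem.List.pyRange ((k : Int) - 1) (-1) (-1)).foldl (minimumMovesStep cs) dp).getD j 0
        = pvGreedy (cs.drop j) := by
  induction k generalizing dp with
  | zero =>
    intro j
    have : PySem.List.pyRange ((0 : Nat) - 1 : Int) (-1) (-1) = [] := by decide
    simp only [Nat.cast_zero] at this ⊢
    rw [this, List.foldl_nil]
    exact hinv j (Nat.zero_le j)
  | succ k ih =>
    have hpeel : ((k + 1 : Nat) : Int) - 1 = (k : Int) := by push_cast; ring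
    rw [hpeel, pvRange_down_cons k, List.foldl_cons]
    have hkl : k < cs.length := by omega
    have hkd : k < dp.length := by omega
    -- the updated entry
    have hval : (minimumMovesStep cs dp (k : Int)).getD k 0 = pvGreedy (cs.drop k) := by
      simp only [minimumMovesStep, Int.toNat_natCast]
      rw [List.getD_eq_getElem _ 0 (by simpa using hkd), List.getElem_set_self]
      have hd : cs.drop k = cs[k] :: cs.drop (k + 1) := (List.getElem_cons_drop hkl).symm
      rw [getElem!_pos cs k hkl, pvGetBang_eq_getD, pvGetBang_eq_getD,
        hinv (k + 1) (by omega), hinv (k + 3) (by omega), hd, pvGreedy]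
      by_cases hO : cs[k] = 'O'
      · rw [if_pos hO, if_pos hO]
      · rw [if_neg hO, if_neg hO, List.drop_drop]
    apply ih (by omega) (minimumMovesStep cs dp (k : Int))
      (by simp [minimumMovesStep, hlen])
    intro j hj
    rcases Nat.eq_or_lt_of_le hj with hj' | hj'
    · rw [← hj']; exact hval
    · -- slots above k are untouched by the set at k
      simp only [minimumMovesStep, Int.toNat_natCast, List.getD]
      rw [List.getElem?_set_ne (by omega)]
      exact hinv j (by omega)

-- ===== VERDICT (by name: the statement is the Claim_ definition above) =====
theorem minimumMoves_spec : Claim_equal_minimumMoves := by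
  intro s _
  show minimumMoves s = minimumMoves_alt s
  simp only [minimumMoves, minimumMoves_alt, pvA_eq_greedy, List.drop_zero, zero_add]
  rw [pvGetBang_eq_getD,
    pvB_fold_inv s.toList s.toList.length le_rfl (List.replicate (s.toList.length + 3) 0)
      (by simp)
      (by intro j hj
          rw [List.drop_eq_nil_of_le (by omega), pvGreedy]
          simp) 0,
    List.drop_zero]
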